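-- pv_equiv track=rewrite | github.com/dablro12/Psycho-Detector | streamlit.py | hanging_cnt_v2
-- ===== SOURCE A (Python) =====
-- def hanging_cnt_v2(frames, threshold):
--     # 그룹을 저장할 리스트
--     groups = []
--
--     # 현재 그룹에 속하는 프레임들을 저장할 리스트
--     current_group = [frames[0]]
--
--     # 프레임별로 그룹을 묶음
--     for i in range(1, len(frames)):
--         # 현재 프레임과 이전 프레임의 차이가 10프레임을 넘지 않으면 같은 그룹으로 묶음
--         if frames[i] - frames[i-1] <= threshold:
--             current_group.append(frames[i])
--         else:
--             # 차이가 10프레임을 넘으면 새로운 그룹 시작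
--             groups.append(current_group)
--             current_group = [frames[i]]
--
--     # 마지막 그룹 추가
--     groups.append(current_group)
--     # 결과 출력
--     return len(groups)
-- ===== SOURCE B (Python) =====
-- def hanging_cnt_v2(frames, threshold):
--     # Divide and conquer: the group count of frames[lo:hi] is the sum of the
--     # counts of the two halves, minus 1 when the halves join across the midpoint.
--     def go(lo, hi):
--         if hi - lo == 1:
--             return 1
--         mid = (lo + hi) // 2
--         joined = frames[mid] - frames[mid - 1] <= threshold
--         return go(lo, mid) + go(mid, hi) - (1 if joined else 0)
--     return go(0, len(frames))
-- ===== Notes on version B (the rewrite author's own statement) =====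
-- stated objective: alternative
-- what changed: B replaces the linear scan that materialises group lists with a divide-and-conquer recursion: it halves the index range, counts groups in each half, and subtracts one when the halves join across the midpoint.
import Mathlib
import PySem

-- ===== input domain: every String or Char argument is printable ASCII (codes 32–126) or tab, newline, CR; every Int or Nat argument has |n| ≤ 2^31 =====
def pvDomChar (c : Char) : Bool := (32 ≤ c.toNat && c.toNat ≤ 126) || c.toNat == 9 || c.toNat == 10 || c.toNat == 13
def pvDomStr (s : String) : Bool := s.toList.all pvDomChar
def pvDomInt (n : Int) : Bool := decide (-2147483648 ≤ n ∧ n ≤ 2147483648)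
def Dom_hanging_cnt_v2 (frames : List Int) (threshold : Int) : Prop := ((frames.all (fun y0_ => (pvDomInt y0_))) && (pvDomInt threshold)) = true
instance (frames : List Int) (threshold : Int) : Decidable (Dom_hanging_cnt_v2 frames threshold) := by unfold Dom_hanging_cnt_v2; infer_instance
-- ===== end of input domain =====

-- B counts groups by divide-and-conquer over the index range instead of A's left-to-right
-- scan that materialises group lists; equivalence is on the return value, on nonempty input.

-- ===== PORT A =====
-- groups/current_group accumulated over 'for i in range(1, len(frames))'; the [] branch is
-- unreachable under Pre_ (frames[0] raises IndexError on the empty list).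
def hanging_cnt_v2 (frames : List Int) (threshold : Int) : Int :=
  match frames with
  | [] => 0
  | f0 :: _ =>
    let st :=
      (PySem.List.pyRange 1 (PySem.List.len frames) 1).foldl
        (fun (st : List (List Int) × List Int) i =>
          if PySem.List.pyGetD frames i 0 - PySem.List.pyGetD frames (i - 1) 0 ≤ threshold then
            (st.1, st.2 ++ [PySem.List.pyGetD frames i 0])
          else
            (st.1 ++ [st.2], [PySem.List.pyGetD frames i 0]))
        (([] : List (List Int)), [f0])
    ((st.1 ++ [st.2]).length : Int)

-- ===== PORT B =====
-- Source B's inner go(lo, hi): lo/hi are always nonnegative in B, so they are Nat here;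
-- Nat (lo+hi)/2 is Python's (lo+hi)//2 on nonnegative ints, and both indices frames[mid],
-- frames[mid-1] are in range whenever hi ≤ frames.length (so getD is exact there).
-- The guard is 'hi ≤ lo + 1' rather than Source B's 'hi - lo == 1' only for totality:
-- the extra case hi ≤ lo is reached only on the empty input, which Pre_ excludes.
def goB (frames : List Int) (threshold : Int) (lo hi : Nat) : Int :=
  if hi ≤ lo + 1 then 1
  else
    let mid := (lo + hi) / 2
    let joined := frames.getD mid 0 - frames.getD (mid - 1) 0 ≤ threshold
    goB frames threshold lo mid + goB frames threshold mid hi - (if joined then 1 else 0)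
termination_by hi - lo
decreasing_by all_goals omega

def hanging_cnt_v2_alt (frames : List Int) (threshold : Int) : Int :=
  goB frames threshold 0 frames.length

-- ===== PRECONDITION & SPEC =====
-- Pre_ excludes only the empty list, on which A raises IndexError at frames[0].
def Pre_hanging_cnt_v2 (frames : List Int) (threshold : Int) : Prop := frames ≠ []
instance (frames : List Int) (threshold : Int) : Decidable (Pre_hanging_cnt_v2 frames threshold) := by unfold Pre_hanging_cnt_v2; infer_instance
def pvWitness_hanging_cnt_v2 : List Int × Int := ([1, 2, 20, 21], 10)

def Spec_hanging_cnt_v2 (frames : List Int) (threshold : Int) (out : Int) : Prop := out = hanging_cnt_v2_alt frames threshold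
instance (frames : List Int) (threshold : Int) (out : Int) : Decidable (Spec_hanging_cnt_v2 frames threshold out) := by unfold Spec_hanging_cnt_v2; infer_instance

-- ===== CLAIM (what is proved, stated in full; the proofs are below) =====
def Claim_equal_hanging_cnt_v2 : Prop := ∀ (frames : List Int) (threshold : Int), Dom_hanging_cnt_v2 frames threshold → Pre_hanging_cnt_v2 frames threshold → Spec_hanging_cnt_v2 frames threshold (hanging_cnt_v2 frames threshold)

-- ===== LEMMAS AND PROOFS =====

-- whether a gap (> threshold) sits between index i-1 and i
def gapIdx (frames : List Int) (threshold : Int) (i : Nat) : Bool :=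
  decide (frames.getD i 0 - frames.getD (i - 1) 0 > threshold)

-- the common characterisation: 1 + number of gap indices in (lo, hi)
def cntN (frames : List Int) (threshold : Int) (lo hi : Nat) : Int :=
  1 + ((List.range' (lo + 1) (hi - 1 - lo)).countP (gapIdx frames threshold) : Int)

-- A's loop as structural recursion over the tail, carrying the previous element.
def loopA (threshold : Int) : List Int → Int → List (List Int) → List Int → List (List Int) × List Int
  | [], _, g, c => (g, c)
  | x :: xs, prev, g, c =>
    if x - prev ≤ threshold then loopA threshold xs x g (c ++ [x])
    else loopA threshold xs x (g ++ [c]) [x]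

lemma A_fold_eq (threshold : Int) :
    ∀ (ys frames : List Int) (j : Nat) (g : List (List Int)) (c : List Int),
    frames.drop j = ys → 1 ≤ j →
    (PySem.List.pyRange (j : Int) (PySem.List.len frames) 1).foldl
        (fun (st : List (List Int) × List Int) i =>
          if PySem.List.pyGetD frames i 0 - PySem.List.pyGetD frames (i - 1) 0 ≤ threshold then
            (st.1, st.2 ++ [PySem.List.pyGetD frames i 0])
          else
            (st.1 ++ [st.2], [PySem.List.pyGetD frames i 0]))
        (g, c)
      = loopA threshold ys (frames.getD (j - 1) 0) g c := by
  intro ys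
  induction ys with
  | nil =>
    intro frames j g c hdrop hj
    have hlen : frames.length ≤ j := by
      by_contra h
      have := List.drop_eq_nil_iff.mp hdrop
      omega
    rw [PySem.List.pyRange_one_eq_nil (by simp [PySem.List.len]; exact_mod_cast hlen)]
    rfl
  | cons x xs ih =>
    intro frames j g c hdrop hj
    have hjlt : j < frames.length := by
      by_contra h
      rw [List.drop_eq_nil_iff.mpr (by omega)] at hdrop
      exact List.cons_ne_nil x xs hdrop.symm
    have hx : frames.getD j 0 = x := by
      have h0 : frames[j]? = some x := by
        have h : (List.drop j frames)[0]? = some x := by rw [hdrop]; rfl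
        rwa [List.getElem?_drop, Nat.add_zero] at h
      simp [List.getD, h0]
    rw [PySem.List.pyRange_one_cons (by simp [PySem.List.len]; exact_mod_cast hjlt)]
    rw [List.foldl_cons]
    have hstep :
        (if PySem.List.pyGetD frames (j : Int) 0 - PySem.List.pyGetD frames ((j : Int) - 1) 0 ≤ threshold then
            (g, c ++ [PySem.List.pyGetD frames (j : Int) 0])
          else (g ++ [c], [PySem.List.pyGetD frames (j : Int) 0]))
        = (if x - frames.getD (j - 1) 0 ≤ threshold then (g, c ++ [x]) else (g ++ [c], [x])) := by
      have h1 : PySem.List.pyGetD frames (j : Int) 0 = x := by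
        rw [PySem.List.pyGetD_natCast]; exact hx
      have h2 : PySem.List.pyGetD frames ((j : Int) - 1) 0 = frames.getD (j - 1) 0 := by
        have : ((j : Int) - 1) = ((j - 1 : Nat) : Int) := by omega
        rw [this, PySem.List.pyGetD_natCast]
      rw [h1, h2]
    rw [hstep]
    have hdrop' : frames.drop (j + 1) = xs := by
      rw [← List.drop_drop, hdrop]; rfl
    have hcast : (j : Int) + 1 = ((j + 1 : Nat) : Int) := by omega
    rw [loopA]
    split_ifs with hc
    all_goals simp only [List.getD] at hx
    · rw [hcast, ih frames (j + 1) g (c ++ [x]) hdrop' (by omega)]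
      simp [hx]
    · rw [hcast, ih frames (j + 1) (g ++ [c]) [x] hdrop' (by omega)]
      simp [hx]

-- A's group count equals 1 + the number of gap indices in the remaining range.
lemma loopA_count (threshold : Int) :
    ∀ (ys frames : List Int) (j : Nat) (g : List (List Int)) (c : List Int),
    frames.drop j = ys → 1 ≤ j →
    (((loopA threshold ys (frames.getD (j - 1) 0) g c).1
        ++ [(loopA threshold ys (frames.getD (j - 1) 0) g c).2]).length : Int)
      = (g.length : Int) + 1 + ((List.range' j ys.length).countP (gapIdx frames threshold) : Int) := by
  intro ys
  induction ys with
  | nil => intro frames j g c _ _; simp [loopA]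
  | cons x xs ih =>
    intro frames j g c hdrop hj
    have hjlt : j < frames.length := by
      by_contra h
      rw [List.drop_eq_nil_iff.mpr (by omega)] at hdrop
      exact List.cons_ne_nil x xs hdrop.symm
    have hx : frames.getD j 0 = x := by
      have h0 : frames[j]? = some x := by
        have h : (List.drop j frames)[0]? = some x := by rw [hdrop]; rfl
        rwa [List.getElem?_drop, Nat.add_zero] at h
      simp [List.getD, h0]
    have hdrop' : frames.drop (j + 1) = xs := by
      rw [← List.drop_drop, hdrop]; rfl
    have hrange : List.range' j (xs.length + 1) = j :: List.range' (j + 1) xs.length := by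
      simp [List.range'_succ]
    have hgap : gapIdx frames threshold j = decide (x - frames.getD (j - 1) 0 > threshold) := by
      unfold gapIdx; rw [hx]
    simp only [List.length_cons, hrange]
    rw [loopA]
    split_ifs with hc
    · have hih := ih frames (j + 1) g (c ++ [x]) hdrop' (by omega)
      simp only [Nat.add_sub_cancel, hx] at hih
      rw [hih]
      have hng : gapIdx frames threshold j = false := by
        rw [hgap]; simp only [decide_eq_false_iff_not]; omega
      simp only [List.countP_cons, hng, Bool.false_eq_true, if_false, Nat.add_zero]
    · have hih := ih frames (j + 1) (g ++ [c]) [x] hdrop' (by omega)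
      simp only [Nat.add_sub_cancel, hx] at hih
      rw [hih]
      have hyg : gapIdx frames threshold j = true := by
        rw [hgap]; simp only [decide_eq_true_eq]; omega
      simp only [List.countP_cons, hyg, if_true, List.length_append, List.length_cons,
        List.length_nil]
      push_cast
      ring

-- B's divide-and-conquer also computes 1 + the number of gap indices in (lo, hi).
lemma goB_eq (frames : List Int) (threshold : Int) :
    ∀ (n lo hi : Nat), hi - lo ≤ n → lo < hi →
    goB frames threshold lo hi = cntN frames threshold lo hi := by
  intro n
  induction n with
  | zero => intro lo hi h1 h2; omega
  | succ n ih =>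
    intro lo hi h1 h2
    rw [goB]
    by_cases hbase : hi ≤ lo + 1
    · have hhi : hi = lo + 1 := by omega
      simp [hbase, cntN, hhi]
    · simp only [hbase, if_false]
      have hmid1 : lo < (lo + hi) / 2 := by omega
      have hmid2 : (lo + hi) / 2 < hi := by omega
      set mid := (lo + hi) / 2 with hmid
      rw [ih lo mid (by omega) hmid1, ih mid hi (by omega) hmid2]
      unfold cntN
      have hsplit : List.range' (lo + 1) (hi - 1 - lo)
          = (List.range' (lo + 1) (mid - 1 - lo) ++ [mid]) ++ List.range' (mid + 1) (hi - 1 - mid) := by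
        have e1 : mid - lo = (mid - 1 - lo) + 1 := by omega
        have e2 : lo + 1 + 1 * (mid - 1 - lo) = mid := by omega
        have hcat : List.range' (lo + 1) (mid - lo) = List.range' (lo + 1) (mid - 1 - lo) ++ [mid] := by
          rw [e1, List.range'_concat, e2]
        have e3 : lo + 1 + 1 * (mid - lo) = mid + 1 := by omega
        have e4 : (mid - lo) + (hi - 1 - mid) = hi - 1 - lo := by omega
        calc List.range' (lo + 1) (hi - 1 - lo)
            = List.range' (lo + 1) ((mid - lo) + (hi - 1 - mid)) := by rw [e4]
          _ = List.range' (lo + 1) (mid - lo) ++ List.range' (lo + 1 + 1 * (mid - lo)) (hi - 1 - mid) :=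
              List.range'_append.symm
          _ = _ := by rw [hcat, e3]
      rw [hsplit]
      by_cases hj : frames.getD mid 0 - frames.getD (mid - 1) 0 ≤ threshold
      · have hg : gapIdx frames threshold mid = false := by
          simp only [gapIdx, decide_eq_false_iff_not]; omega
        rw [if_pos hj]
        simp only [List.countP_append, List.countP_cons, List.countP_nil, hg,
          Bool.false_eq_true, if_false, Nat.add_zero, Nat.zero_add]
        push_cast
        ring
      · have hg : gapIdx frames threshold mid = true := by
          simp only [gapIdx, decide_eq_true_eq]; omega
        rw [if_neg hj]
        simp only [List.countP_append, List.countP_cons, List.countP_nil, hg,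
          eq_self_iff_true, if_true, Nat.add_zero, Nat.zero_add]
        push_cast
        ring

-- ===== VERDICT (by name: the statement is the Claim_ definition above) =====
theorem hanging_cnt_v2_spec : Claim_equal_hanging_cnt_v2 := by
  intro frames threshold _ hpre
  unfold Spec_hanging_cnt_v2 hanging_cnt_v2 hanging_cnt_v2_alt
  match frames, hpre with
  | f0 :: rest, _ =>
    simp only
    have hdrop : (f0 :: rest).drop 1 = rest := rfl
    have h1 := A_fold_eq threshold rest (f0 :: rest) 1 [] [f0] hdrop (le_refl 1)
    simp only [Nat.cast_one] at h1
    rw [h1]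
    have h2 := loopA_count threshold rest (f0 :: rest) 1 [] [f0] hdrop (le_refl 1)
    rw [h2]
    have h3 := goB_eq (f0 :: rest) threshold (rest.length + 1) 0 (f0 :: rest).length
      (by simp) (by simp)
    rw [h3]
    simp [cntN]
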